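-- pv_equiv track=rewrite | github.com/scarlettnik/marchuk_mipt_homeworks_2026 | part3_types_conditions_loops_functions/hw3.py | split_amount_parts
-- ===== SOURCE A (Python) =====
-- MINUS_SIGN = "-"
--
-- DECIMAL_POINT = "."
--
-- AmountParts = tuple[str, str, int]
--
-- def is_valid_amount_symbol(symbol: str, left: str, *, in_fraction: bool) -> bool:
--     if symbol.isdigit():
--         return True
--     return symbol == MINUS_SIGN and left == "" and not in_fraction
--
-- def split_amount_parts(amount_str: str) -> AmountParts | None:
--     dot_count = 0
--     left = ""
--     right = ""
--     in_fraction = False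
--
--     for symbol in amount_str:
--         if symbol == DECIMAL_POINT:
--             dot_count += 1
--             in_fraction = True
--             continue
--         if not is_valid_amount_symbol(symbol, left, in_fraction=in_fraction):
--             return None
--         if in_fraction:
--             right += symbol
--         else:
--             left += symbol
--
--     return left, right, dot_count
-- ===== SOURCE B (Python) =====
-- MINUS_SIGN = "-"
-- DECIMAL_POINT = "."
--
-- def split_amount_parts(amount_str):
--     sign = ""
--     body = amount_str
--     if body.startswith(MINUS_SIGN):
--         sign, body = MINUS_SIGN, body[1:]
--     if any(not (c.isdigit() or c == DECIMAL_POINT) for c in body):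
--         return None
--     parts = body.split(DECIMAL_POINT)
--     return sign + parts[0], "".join(parts[1:]), len(parts) - 1
-- ===== Notes on version B (the rewrite author's own statement) =====
-- stated objective: simpler
-- what changed: Replaces A's char-by-char state-machine loop (left/right accumulators, in_fraction flag, per-char validity helper) with an up-front decomposition: strip an optional leading '-', validate the body in one any() pass, then split on '.' and assemble the parts.
import Mathlib
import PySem

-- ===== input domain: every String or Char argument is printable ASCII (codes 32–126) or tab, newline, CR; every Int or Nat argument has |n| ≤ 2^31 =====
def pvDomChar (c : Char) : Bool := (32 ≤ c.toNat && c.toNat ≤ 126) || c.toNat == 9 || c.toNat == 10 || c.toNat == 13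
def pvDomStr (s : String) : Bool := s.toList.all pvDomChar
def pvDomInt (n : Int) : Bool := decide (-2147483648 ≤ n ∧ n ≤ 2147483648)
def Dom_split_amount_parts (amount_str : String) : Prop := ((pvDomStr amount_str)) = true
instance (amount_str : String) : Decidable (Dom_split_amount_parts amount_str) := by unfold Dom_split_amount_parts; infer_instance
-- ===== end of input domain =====

-- B computes the split up front (optional leading '-', one validation pass, split on '.')
-- instead of A's char-by-char accumulator loop; objective: simpler decomposition, not faster.

-- ===== PORT A =====
def isValidAmountSymbol (symbol : Char) (left : List Char) (in_fraction : Bool) : Bool :=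
  if PySem.Chars.isdigit symbol then true
  else symbol == '-' && left == ([] : List Char) && !in_fraction

def splitLoopA : List Char → Int → List Char → List Char → Bool → Option (String × String × Int)
  | [], dot_count, left, right, _ => some (String.mk left, String.mk right, dot_count)
  | symbol :: rest, dot_count, left, right, in_fraction =>
    if symbol == '.' then splitLoopA rest (dot_count + 1) left right true
    else if !(isValidAmountSymbol symbol left in_fraction) then none
    else if in_fraction then splitLoopA rest dot_count left (right ++ [symbol]) in_fraction
    else splitLoopA rest dot_count (left ++ [symbol]) right in_fraction

def split_amount_parts (amount_str : String) : Option (String × String × Int) :=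
  splitLoopA amount_str.toList 0 [] [] false

-- ===== PORT B =====
-- str.split('.') is ported as the corresponding library call List.splitOn '.'; ''.join as List.flatten.
def split_amount_parts_alt (amount_str : String) : Option (String × String × Int) :=
  let cs := amount_str.toList
  let sign : List Char := if PySem.Chars.startswith cs ['-'] then ['-'] else []
  let body : List Char := if PySem.Chars.startswith cs ['-'] then cs.tail else cs
  if body.all (fun c => PySem.Chars.isdigit c || c == '.') then
    let parts := body.splitOn '.'
    some (String.mk (sign ++ parts.headI), String.mk (List.flatten parts.tail),
          (parts.length : Int) - 1)
  else none

-- ===== PRECONDITION & SPEC =====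
def Spec_split_amount_parts (amount_str : String) (out : Option (String × String × Int)) : Prop := out = split_amount_parts_alt amount_str
instance (amount_str : String) (out : Option (String × String × Int)) : Decidable (Spec_split_amount_parts amount_str out) := by unfold Spec_split_amount_parts; infer_instance

-- ===== CLAIM (what is proved, stated in full; the proofs are below) =====
def Claim_equal_split_amount_parts : Prop := ∀ (amount_str : String), Dom_split_amount_parts amount_str → Spec_split_amount_parts amount_str (split_amount_parts amount_str)

-- ===== LEMMAS AND PROOFS =====

-- abbreviation used only in proofs
def okChar (c : Char) : Bool := PySem.Chars.isdigit c || c == '.'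

lemma loopA_fraction (cs : List Char) : ∀ (dc : Int) (l r : List Char),
    splitLoopA cs dc l r true =
      if cs.all okChar then
        some (String.mk l, String.mk (r ++ cs.filter (fun c => !(c == '.'))), dc + cs.count '.')
      else none := by
  induction cs with
  | nil => intro dc l r; simp [splitLoopA]
  | cons c cs ih =>
    intro dc l r
    by_cases hdot : c = '.'
    · subst hdot
      simp [splitLoopA, ih, okChar, List.count_cons]
      split_ifs with h
      · simp only [Option.some.injEq, Prod.mk.injEq]
        refine ⟨by simp, by simp, ?_⟩
        push_cast; ring
      · rfl
    · simp only [splitLoopA, beq_iff_eq, if_neg hdot]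
      by_cases hd : PySem.Chars.isdigit c
      · simp [isValidAmountSymbol, hd, ih, okChar, hdot]
      · have hval : isValidAmountSymbol c l true = false := by
          simp [isValidAmountSymbol, hd]
        simp [hval, okChar, hd, hdot]

lemma loopA_integer (cs : List Char) : ∀ (dc : Int) (l r : List Char), l ≠ [] →
    splitLoopA cs dc l r false =
      if cs.all okChar then
        some (String.mk (l ++ cs.takeWhile (fun c => !(c == '.'))),
              String.mk (r ++ ((cs.dropWhile (fun c => !(c == '.'))).drop 1).filter (fun c => !(c == '.'))),
              dc + cs.count '.')
      else none := by
  induction cs with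
  | nil => intro dc l r _; simp [splitLoopA]
  | cons c cs ih =>
    intro dc l r hl
    by_cases hdot : c = '.'
    · subst hdot
      simp [splitLoopA, loopA_fraction, okChar, List.count_cons, List.takeWhile_cons,
            List.dropWhile_cons]
      split_ifs with h
      · simp only [Option.some.injEq, Prod.mk.injEq]
        refine ⟨by simp, by simp, ?_⟩
        push_cast; ring
      · rfl
    · simp only [splitLoopA, beq_iff_eq, if_neg hdot]
      by_cases hd : PySem.Chars.isdigit c
      · have hne : l ++ [c] ≠ [] := by simp
        simp [isValidAmountSymbol, hd, ih _ _ _ hne, okChar, hdot, List.takeWhile_cons,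
              List.dropWhile_cons]
      · have hval : isValidAmountSymbol c l false = false := by
          simp [isValidAmountSymbol, hd, hl]
        simp [hval, okChar, hd, hdot]

lemma splitOn_ne_nil (cs : List Char) : cs.splitOn '.' ≠ [] := by
  simp [List.splitOn]; exact List.splitOnP_ne_nil _ cs

lemma splitOn_flatten (cs : List Char) :
    List.flatten (cs.splitOn '.') = cs.filter (fun c => !(c == '.')) := by
  induction cs with
  | nil => simp [List.splitOn]
  | cons c cs ih =>
    by_cases hdot : c = '.'
    · subst hdot; simp [List.splitOn, List.splitOnP_cons] at *; simpa using ih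
    · have h := splitOn_ne_nil cs
      simp only [List.splitOn, List.splitOnP_cons] at *
      simp only [beq_iff_eq, if_neg hdot, List.filter_cons, hdot]
      cases hsp : cs.splitOnP (· == '.') with
      | nil => exact absurd hsp h
      | cons p ps => simp_all

lemma splitOn_headI (cs : List Char) :
    (cs.splitOn '.').headI = cs.takeWhile (fun c => !(c == '.')) := by
  induction cs with
  | nil => simp [List.splitOn]
  | cons c cs ih =>
    by_cases hdot : c = '.'
    · subst hdot; simp [List.splitOn, List.splitOnP_cons, List.takeWhile_cons]
    · have h := splitOn_ne_nil cs
      simp only [List.splitOn, List.splitOnP_cons] at *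
      simp only [beq_iff_eq, if_neg hdot, List.takeWhile_cons, hdot]
      cases hsp : cs.splitOnP (· == '.') with
      | nil => exact absurd hsp h
      | cons p ps => simp_all

lemma splitOn_tail_flatten (cs : List Char) :
    List.flatten (cs.splitOn '.').tail =
      ((cs.dropWhile (fun c => !(c == '.'))).drop 1).filter (fun c => !(c == '.')) := by
  induction cs with
  | nil => simp [List.splitOn]
  | cons c cs ih =>
    by_cases hdot : c = '.'
    · subst hdot
      simp [List.splitOn, List.splitOnP_cons, List.dropWhile_cons]
      simpa [List.splitOn] using splitOn_flatten cs
    · have h := splitOn_ne_nil cs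
      simp only [List.splitOn, List.splitOnP_cons] at *
      simp only [beq_iff_eq, if_neg hdot, List.dropWhile_cons, hdot]
      cases hsp : cs.splitOnP (· == '.') with
      | nil => exact absurd hsp h
      | cons p ps => simp_all

lemma splitOn_length (cs : List Char) :
    (cs.splitOn '.').length = cs.count '.' + 1 := by
  induction cs with
  | nil => simp [List.splitOn]
  | cons c cs ih =>
    by_cases hdot : c = '.'
    · subst hdot; simp [List.splitOn, List.splitOnP_cons, List.count_cons] at *; omega
    · have h := splitOn_ne_nil cs
      simp only [List.splitOn, List.splitOnP_cons] at *
      simp only [beq_iff_eq, if_neg hdot, List.count_cons, hdot]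
      cases hsp : cs.splitOnP (· == '.') with
      | nil => exact absurd hsp h
      | cons p ps => simp_all

-- B's branch, rewritten in the same closed form the A-side lemmas produce
lemma alt_closed (sign body : List Char) :
    (if body.all (fun c => PySem.Chars.isdigit c || c == '.') then
       some (String.mk (sign ++ (body.splitOn '.').headI),
             String.mk (List.flatten (body.splitOn '.').tail),
             (((body.splitOn '.').length : Int) - 1))
     else none)
    = if body.all okChar then
        some (String.mk (sign ++ body.takeWhile (fun c => !(c == '.'))),
              String.mk (((body.dropWhile (fun c => !(c == '.'))).drop 1).filter (fun c => !(c == '.'))),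
              (body.count '.' : Int))
      else none := by
  rw [splitOn_headI, splitOn_tail_flatten, splitOn_length]
  have : ((((body.count '.') + 1 : Nat) : Int) - 1) = (body.count '.' : Int) := by push_cast; ring
  rw [this]
  rfl

-- ===== VERDICT (by name: the statement is the Claim_ definition above) =====
theorem split_amount_parts_spec : Claim_equal_split_amount_parts := by
  intro s _
  unfold Spec_split_amount_parts split_amount_parts split_amount_parts_alt
  cases hcs : s.toList with
  | nil => simp [splitLoopA, PySem.Chars.startswith, List.isPrefixOf, List.splitOn]
  | cons c cs =>
    by_cases hdot : c = '.'
    · subst hdot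
      have hsw : PySem.Chars.startswith ('.' :: cs) ['-'] = false := by
        simp [PySem.Chars.startswith, List.isPrefixOf]
      simp only [hsw, Bool.false_eq_true, if_false, List.tail_cons]
      rw [alt_closed]
      simp [splitLoopA, loopA_fraction, okChar, List.count_cons]
      split_ifs with h
      · simp only [Option.some.injEq, Prod.mk.injEq]
        refine ⟨by simp, by simp, ?_⟩
        push_cast; ring
      · rfl
    · by_cases hminus : c = '-'
      · subst hminus
        have hsw : PySem.Chars.startswith ('-' :: cs) ['-'] = true := by
          simp [PySem.Chars.startswith, List.isPrefixOf]
        have hval : isValidAmountSymbol '-' [] false = true := by decide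
        simp only [hsw, if_true, List.tail_cons]
        rw [alt_closed]
        simp only [splitLoopA, beq_iff_eq, if_neg (by decide : ¬('-' = '.')), hval,
          Bool.not_true, Bool.false_eq_true, if_false, List.nil_append]
        rw [loopA_integer cs 0 ['-'] [] (by simp)]
        simp
      · by_cases hd : PySem.Chars.isdigit c
        · have hsw : PySem.Chars.startswith (c :: cs) ['-'] = false := by
            simp [PySem.Chars.startswith, List.isPrefixOf]; exact Ne.symm hminus
          have hval : isValidAmountSymbol c [] false = true := by
            simp [isValidAmountSymbol, hd]
          simp only [hsw, Bool.false_eq_true, if_false]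
          rw [alt_closed]
          simp only [splitLoopA, beq_iff_eq, if_neg hdot, hval, Bool.not_true,
            Bool.false_eq_true, if_false, List.nil_append]
          rw [loopA_integer cs 0 [c] [] (by simp)]
          have hok : okChar c = true := by simp [okChar, hd]
          simp [okChar, hd, List.takeWhile_cons, List.dropWhile_cons, hdot, List.count_cons]
        · have hsw : PySem.Chars.startswith (c :: cs) ['-'] = false := by
            simp [PySem.Chars.startswith, List.isPrefixOf]; exact Ne.symm hminus
          have hval : isValidAmountSymbol c [] false = false := by
            simp [isValidAmountSymbol, hd, hminus]
          simp only [hsw, Bool.false_eq_true, if_false]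
          simp [splitLoopA, hdot, hval, okChar, hd]
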